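-- pv_equiv track=rewrite | github.com/Vladimir-82/code_wars_4 | Mirrored_Exponential_Chunks.py | mirrored_exponential_chunks
-- ===== SOURCE A (Python) =====
-- def mirrored_exponential_chunks(arr):
--     '''
--     def mirrored_exponential_chunks(arr):
--     '''
--     if len(arr) % 2:
--         middle = len(arr) // 2
--         left = arr[:middle]
--         right = arr[middle+1:]
--     else:
--         left = arr[:len(arr) // 2]
--         right = arr[(len(arr) + 1) // 2:]
--
--     left_out = []
--     right_out = []
--     step = 2
--     while left:
--         left_out.append(left[-step:])
--         left = left[:-step]
--
--         right_out.append((right[:step]))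
--         right = right[step:]
--         step = step * 2
--     left_out = left_out[::-1]
--     if len(arr) % 2:
--         left_out.append([arr[middle]])
--
--     return left_out + right_out
-- ===== SOURCE B (Python) =====
-- def mirrored_exponential_chunks(arr):
--     n = len(arr)
--     m = n // 2
--     # descending cut positions inside the left half: m, m-2, m-6, m-14, ... down to 0
--     cuts = [m]
--     c, step = 0, 2
--     while c < m:
--         c += step
--         step *= 2
--         cuts.append(max(m - c, 0))
--     rev = cuts[::-1]
--     out = [arr[a:b] for a, b in zip(rev, rev[1:])]
--     if n % 2:
--         out.append([arr[m]])
--     off = n - m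
--     out.extend(arr[off + m - a: off + m - b] for a, b in zip(cuts, cuts[1:]))
--     return out
-- ===== Notes on version B (the rewrite author's own statement) =====
-- stated objective: faster
-- what changed: Instead of repeatedly slicing and reassigning the shrinking left/right lists (copying the remainder every iteration), B computes the O(log n) chunk boundary positions by index arithmetic once and slices each chunk directly out of the original array in a single pass.
import Mathlib
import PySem

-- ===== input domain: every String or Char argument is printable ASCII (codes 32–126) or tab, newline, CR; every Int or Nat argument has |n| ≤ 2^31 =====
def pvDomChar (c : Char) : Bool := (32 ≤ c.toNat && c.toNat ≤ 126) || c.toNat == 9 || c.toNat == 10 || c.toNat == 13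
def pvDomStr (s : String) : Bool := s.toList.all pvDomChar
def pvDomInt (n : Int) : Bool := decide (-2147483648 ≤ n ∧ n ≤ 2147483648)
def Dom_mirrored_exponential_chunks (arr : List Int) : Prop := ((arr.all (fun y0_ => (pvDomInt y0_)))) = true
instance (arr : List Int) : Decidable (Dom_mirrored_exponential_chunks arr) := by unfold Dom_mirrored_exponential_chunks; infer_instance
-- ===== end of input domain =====

-- B replaces A's repeated slice-and-reassign of the shrinking left/right halves by computing the
-- chunk boundary positions once and slicing each chunk directly out of arr (objective: faster).

-- ===== PORT A =====
-- the while loop of A; fuel = left.length suffices: each iteration shortens left (step ≥ 2)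
def pvALoop (fuel : Nat) (left right : List Int) (leftOut rightOut : List (List Int))
    (step : Int) : List (List Int) × List (List Int) :=
  match fuel with
  | 0 => (leftOut, rightOut)
  | fuel + 1 =>
    if left = [] then (leftOut, rightOut)
    else
      pvALoop fuel
        (PySem.List.slice left none (some (-step)))                -- left = left[:-step]
        (PySem.List.slice right (some step) none)                  -- right = right[step:]
        (leftOut ++ [PySem.List.slice left (some (-step)) none])   -- left_out.append(left[-step:])
        (rightOut ++ [PySem.List.slice right none (some step)])    -- right_out.append(right[:step])
        (step * 2)

def mirrored_exponential_chunks (arr : List Int) : List (List Int) :=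
  let n : Int := (arr.length : Int)
  let middle := PySem.Int.floordiv n 2      -- assigned in the odd branch of A
  let left := if PySem.Int.mod n 2 ≠ 0 then PySem.List.slice arr none (some middle)
              else PySem.List.slice arr none (some (PySem.Int.floordiv n 2))
  let right := if PySem.Int.mod n 2 ≠ 0 then PySem.List.slice arr (some (middle + 1)) none
               else PySem.List.slice arr (some (PySem.Int.floordiv (n + 1) 2)) none
  let r := pvALoop left.length left right [] [] 2
  let lo := r.1.reverse                     -- left_out = left_out[::-1]
  let lo := if PySem.Int.mod n 2 ≠ 0 then lo ++ [[PySem.List.pyGetD arr middle 0]] else lo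
            -- arr[middle] is always in range here (n odd, middle = n // 2 < n)
  lo ++ r.2

-- ===== PORT B =====
-- the cuts-building while loop of B; fuel = m.toNat suffices: c grows by step ≥ 2 each iteration
def pvBCuts (fuel : Nat) (m c step : Int) : List Int :=
  match fuel with
  | 0 => []
  | fuel + 1 =>
    if c < m then max (m - (c + step)) 0 :: pvBCuts fuel m (c + step) (step * 2)
    else []

def mirrored_exponential_chunks_alt (arr : List Int) : List (List Int) :=
  let n : Int := (arr.length : Int)
  let m := PySem.Int.floordiv n 2
  let cuts := m :: pvBCuts m.toNat m 0 2
  let rev := cuts.reverse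
  let out := (rev.zip rev.tail).map (fun p => PySem.List.slice arr (some p.1) (some p.2))
  let out := if PySem.Int.mod n 2 ≠ 0 then out ++ [[PySem.List.pyGetD arr m 0]] else out
  let off := n - m
  out ++ (cuts.zip cuts.tail).map
    (fun p => PySem.List.slice arr (some (off + m - p.1)) (some (off + m - p.2)))

-- ===== PRECONDITION & SPEC =====
def Spec_mirrored_exponential_chunks (arr : List Int) (out : List (List Int)) : Prop := out = mirrored_exponential_chunks_alt arr
instance (arr : List Int) (out : List (List Int)) : Decidable (Spec_mirrored_exponential_chunks arr out) := by unfold Spec_mirrored_exponential_chunks; infer_instance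

-- ===== CLAIM (what is proved, stated in full; the proofs are below) =====
def Claim_equal_mirrored_exponential_chunks : Prop := ∀ (arr : List Int), Dom_mirrored_exponential_chunks arr → Spec_mirrored_exponential_chunks arr (mirrored_exponential_chunks arr)

-- ===== LEMMAS AND PROOFS =====

-- descending cumulative cut positions: m, m-2^(i+1), m-2^(i+1)-2^(i+2), … , 0
def cutsD (m i : Nat) : List Nat :=
  m :: (if h : 0 < m then cutsD (m - 2 ^ (i + 1)) (i + 1) else [])
termination_by m
decreasing_by have : 0 < 2 ^ (i + 1) := Nat.two_pow_pos (i + 1); omega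

def pairs {α : Type} (l : List α) : List (α × α) := l.zip l.tail

-- left chunks in the order A appends them (from the end of L, sizes 2^(i+1), 2^(i+2), …)
def lchunks (L : List Int) (i : Nat) : List (List Int) :=
  if h : L = [] then []
  else L.drop (L.length - 2 ^ (i + 1)) :: lchunks (L.take (L.length - 2 ^ (i + 1))) (i + 1)
termination_by L.length
decreasing_by
  simp only [List.length_take]
  have h1 : 0 < 2 ^ (i + 1) := Nat.two_pow_pos (i + 1)
  have h2 : L.length ≠ 0 := fun hh => h (List.eq_nil_of_length_eq_zero hh)
  omega

def rchunks (R : List Int) (i : Nat) : List (List Int) :=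
  if h : R = [] then []
  else R.take (2 ^ (i + 1)) :: rchunks (R.drop (2 ^ (i + 1))) (i + 1)
termination_by R.length
decreasing_by
  simp only [List.length_drop]
  have h1 : 0 < 2 ^ (i + 1) := Nat.two_pow_pos (i + 1)
  have h2 : R.length ≠ 0 := fun hh => h (List.eq_nil_of_length_eq_zero hh)
  omega

lemma pairs_cons_cons {α : Type} (a b : α) (t : List α) :
    pairs (a :: b :: t) = (a, b) :: pairs (b :: t) := by
  simp [pairs]

lemma mem_pairs {α : Type} {p : α × α} {l : List α} (h : p ∈ pairs l) : p.1 ∈ l ∧ p.2 ∈ l := by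
  obtain ⟨a, b⟩ := p
  have h2 := List.of_mem_zip h
  exact ⟨h2.1, List.mem_of_mem_tail h2.2⟩

lemma pvALoop_eq (fuel : Nat) : ∀ (i : Nat) (L R : List Int) (lo ro : List (List Int)),
    L.length = R.length → L.length ≤ fuel →
    pvALoop fuel L R lo ro ((2 ^ (i + 1) : Nat) : Int) = (lo ++ lchunks L i, ro ++ rchunks R i) := by
  induction fuel with
  | zero =>
    intro i L R lo ro hlen hle
    have hL : L = [] := by cases L <;> simp_all
    have hR : R = [] := by cases R <;> simp_all
    subst hL; subst hR
    simp [pvALoop, lchunks, rchunks]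
  | succ fuel ih =>
    intro i L R lo ro hlen hle
    by_cases hL : L = []
    · have hR : R = [] := by cases R <;> simp_all
      subst hL; subst hR
      simp [pvALoop, lchunks, rchunks]
    · have hR : R ≠ [] := by cases R <;> simp_all
      have hk : 0 < 2 ^ (i + 1) := Nat.two_pow_pos (i + 1)
      have hLpos : 0 < L.length := List.length_pos_iff.mpr hL
      rw [pvALoop, if_neg hL,
          PySem.List.slice_to_neg_natCast L (2 ^ (i + 1)) hk,
          PySem.List.slice_from_neg_natCast L (2 ^ (i + 1)) hk,
          PySem.List.slice_from_natCast, PySem.List.slice_to_natCast]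
      have hstep : ((2 ^ (i + 1) : Nat) : Int) * 2 = ((2 ^ (i + 1 + 1) : Nat) : Int) := by
        push_cast; ring
      rw [hstep,
          ih (i + 1) _ _ _ _
            (by simp only [List.length_take, List.length_drop]; omega)
            (by simp only [List.length_take]; omega)]
      conv_rhs => rw [lchunks, dif_neg hL, rchunks, dif_neg hR]
      simp [List.append_assoc]

lemma cutsD_mem_le (m i : Nat) : ∀ x ∈ cutsD m i, x ≤ m := by
  induction m using Nat.strong_induction_on generalizing i with
  | _ m ih =>
    intro x hx
    rw [cutsD] at hx
    rcases List.mem_cons.mp hx with rfl | hx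
    · exact le_refl x
    · by_cases h : 0 < m
      · rw [dif_pos h] at hx
        have hk : 0 < 2 ^ (i + 1) := Nat.two_pow_pos (i + 1)
        have := ih (m - 2 ^ (i + 1)) (by omega) (i + 1) x hx
        omega
      · rw [dif_neg h] at hx
        simp at hx

lemma lchunks_eq (L : List Int) (i : Nat) :
    lchunks L i = (pairs (cutsD L.length i)).map (fun p => (L.take p.1).drop p.2) := by
  induction hn : L.length using Nat.strong_induction_on generalizing L i with
  | _ m ih =>
    subst hn
    by_cases hL : L = []
    · subst hL
      rw [lchunks, dif_pos rfl, cutsD]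
      simp [pairs]
    · have hLpos : 0 < L.length := List.length_pos_iff.mpr hL
      have hk : 0 < 2 ^ (i + 1) := Nat.two_pow_pos (i + 1)
      have hlen' : (L.take (L.length - 2 ^ (i + 1))).length = L.length - 2 ^ (i + 1) := by
        rw [List.length_take]; omega
      have htail : lchunks (L.take (L.length - 2 ^ (i + 1))) (i + 1)
          = (pairs (cutsD (L.length - 2 ^ (i + 1)) (i + 1))).map
              (fun p => (L.take p.1).drop p.2) := by
        rw [ih (L.length - 2 ^ (i + 1)) (by omega) _ (i + 1) hlen']
        apply List.map_congr_left
        intro p hp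
        have hle : p.1 ≤ L.length - 2 ^ (i + 1) := cutsD_mem_le _ _ _ (mem_pairs hp).1
        rw [List.take_take, min_eq_left hle]
      obtain ⟨T, hT⟩ : ∃ T, cutsD (L.length - 2 ^ (i + 1)) (i + 1)
          = (L.length - 2 ^ (i + 1)) :: T := ⟨_, by rw [cutsD]⟩
      rw [lchunks, dif_neg hL, htail]
      conv_rhs => rw [cutsD, dif_pos hLpos, hT, pairs_cons_cons, List.map_cons, ← hT]
      congr 1
      simp [List.take_length]

lemma rchunks_eq (R : List Int) (i : Nat) :
    rchunks R i = (pairs (cutsD R.length i)).map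
      (fun p => (R.take (R.length - p.2)).drop (R.length - p.1)) := by
  induction hn : R.length using Nat.strong_induction_on generalizing R i with
  | _ m ih =>
    subst hn
    by_cases hR : R = []
    · subst hR
      rw [rchunks, dif_pos rfl, cutsD]
      simp [pairs]
    · have hRpos : 0 < R.length := List.length_pos_iff.mpr hR
      have hk : 0 < 2 ^ (i + 1) := Nat.two_pow_pos (i + 1)
      have hlen' : (R.drop (2 ^ (i + 1))).length = R.length - 2 ^ (i + 1) := by
        simp [List.length_drop]
      have htail : rchunks (R.drop (2 ^ (i + 1))) (i + 1)
          = (pairs (cutsD (R.length - 2 ^ (i + 1)) (i + 1))).map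
              (fun p => (R.take (R.length - p.2)).drop (R.length - p.1)) := by
        rw [ih (R.length - 2 ^ (i + 1)) (by omega) _ (i + 1) hlen']
        apply List.map_congr_left
        intro p hp
        rcases Nat.le_total (2 ^ (i + 1)) R.length with hkm | hkm
        · have h1 : p.1 ≤ R.length - 2 ^ (i + 1) := cutsD_mem_le _ _ _ (mem_pairs hp).1
          have h2 : p.2 ≤ R.length - 2 ^ (i + 1) := cutsD_mem_le _ _ _ (mem_pairs hp).2
          rw [List.drop_take, List.drop_take, List.drop_drop]
          congr 1
          · omega
          · congr 1
            omega
        · -- 2^(i+1) ≥ len: cutsD 0 has no pairs, hp is absurd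
          exfalso
          have h0 : R.length - 2 ^ (i + 1) = 0 := by omega
          rw [h0, cutsD] at hp
          simp [pairs] at hp
      obtain ⟨T, hT⟩ : ∃ T, cutsD (R.length - 2 ^ (i + 1)) (i + 1)
          = (R.length - 2 ^ (i + 1)) :: T := ⟨_, by rw [cutsD]⟩
      rw [rchunks, dif_neg hR, htail]
      conv_rhs => rw [cutsD, dif_pos hRpos, hT, pairs_cons_cons, List.map_cons, ← hT]
      congr 1
      simp only [Nat.sub_self, List.drop_zero]
      rcases Nat.le_total (2 ^ (i + 1)) R.length with h | h
      · rw [Nat.sub_sub_self h]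
      · rw [Nat.sub_eq_zero_of_le h, Nat.sub_zero, List.take_length,
            List.take_of_length_le h]

lemma pvBCuts_eq (fuel : Nat) : ∀ (i m c : Nat), m - c ≤ fuel →
    pvBCuts fuel (m : Int) (c : Int) ((2 ^ (i + 1) : Nat) : Int)
      = (cutsD (m - c) i).tail.map (fun x : Nat => (x : Int)) := by
  induction fuel with
  | zero =>
    intro i m c hle
    have hc : ¬ ((c : Int) < (m : Int)) := by omega
    have h0 : m - c = 0 := by omega
    rw [pvBCuts.eq_def]
    simp only []
    rw [h0, cutsD]
    simp
  | succ fuel ih =>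
    intro i m c hle
    by_cases hc : c < m
    · have hk : 0 < 2 ^ (i + 1) := Nat.two_pow_pos (i + 1)
      rw [pvBCuts, if_pos (by exact_mod_cast hc)]
      have hmax : max ((m : Int) - ((c : Int) + ((2 ^ (i + 1) : Nat) : Int))) 0
          = ((m - (c + 2 ^ (i + 1)) : Nat) : Int) := by omega
      have hstep : ((2 ^ (i + 1) : Nat) : Int) * 2 = ((2 ^ (i + 1 + 1) : Nat) : Int) := by
        push_cast; ring
      have hcast : (c : Int) + ((2 ^ (i + 1) : Nat) : Int) = ((c + 2 ^ (i + 1) : Nat) : Int) := by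
        push_cast; ring
      rw [hmax, hstep, hcast, ih (i + 1) m (c + 2 ^ (i + 1)) (by omega)]
      have harg : m - c - 2 ^ (i + 1) = m - (c + 2 ^ (i + 1)) := by omega
      conv_rhs => rw [cutsD, dif_pos (by omega : 0 < m - c), List.tail_cons, harg]
      obtain ⟨T, hT⟩ : ∃ T, cutsD (m - (c + 2 ^ (i + 1))) (i + 1)
          = (m - (c + 2 ^ (i + 1))) :: T := ⟨_, by rw [cutsD]⟩
      rw [hT]
      simp
    · rw [pvBCuts, if_neg (by exact_mod_cast hc)]
      have h0 : m - c = 0 := by omega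
      rw [h0, cutsD]
      simp

lemma pairs_append_singleton {α : Type} : ∀ (l : List α) (x : α),
    pairs (l ++ [x]) = pairs l ++ (match l.getLast? with | none => [] | some y => [(y, x)]) := by
  intro l
  induction l with
  | nil => intro x; simp [pairs]
  | cons a t ih =>
    intro x
    cases t with
    | nil => simp [pairs]
    | cons b t' =>
      have : (a :: b :: t') ++ [x] = a :: ((b :: t') ++ [x]) := by simp
      rw [this]
      have hcons : (b :: t') ++ [x] = b :: (t' ++ [x]) := by simp
      rw [hcons, pairs_cons_cons, ← hcons, ih x, pairs_cons_cons]
      simp [List.getLast?_cons_cons]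

lemma pairs_reverse {α : Type} : ∀ (l : List α),
    pairs l.reverse = ((pairs l).map Prod.swap).reverse := by
  intro l
  induction l with
  | nil => simp [pairs]
  | cons a t ih =>
    cases t with
    | nil => simp [pairs]
    | cons b t' =>
      rw [List.reverse_cons, pairs_append_singleton, ih, pairs_cons_cons]
      have hlast : (b :: t').reverse.getLast? = some b := by
        rw [List.getLast?_reverse]
        simp
      rw [hlast]
      simp

lemma pairs_map {α β : Type} (g : α → β) (l : List α) :
    pairs (l.map g) = (pairs l).map (Prod.map g g) := by
  cases l with
  | nil => rfl
  | cons a t => exact List.zip_map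

lemma zip_tail_eq_pairs (l : List Int) : l.zip l.tail = pairs l := rfl

lemma left_part (arr : List Int) (M : Nat) (hM : M ≤ arr.length) :
    (lchunks (arr.take M) 0).reverse
      = ((((M : Int) :: pvBCuts M (M : Int) 0 2).reverse).zip
          (((M : Int) :: pvBCuts M (M : Int) 0 2).reverse).tail).map
            (fun p => PySem.List.slice arr (some p.1) (some p.2)) := by
  have hlenL : (arr.take M).length = M := by rw [List.length_take]; omega
  rw [lchunks_eq, hlenL]
  rw [show (0 : Int) = ((0 : Nat) : Int) from rfl]
  rw [show (2 : Int) = ((2 ^ (0 + 1) : Nat) : Int) from by norm_num]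
  rw [pvBCuts_eq M 0 M 0 (by omega)]
  simp only [Nat.sub_zero]
  obtain ⟨T, hT⟩ : ∃ T, cutsD M 0 = M :: T := ⟨_, by rw [cutsD]⟩
  rw [hT]
  simp only [List.tail_cons]
  rw [show ((M : Int) :: T.map (fun x : Nat => (x : Int))) = (M :: T).map (fun x : Nat => (x : Int)) from by
    simp]
  conv_rhs => rw [← List.map_reverse, zip_tail_eq_pairs, pairs_map, pairs_reverse,
    List.map_reverse, List.map_reverse, List.map_map, List.map_map]
  congr 1
  apply List.map_congr_left
  rintro ⟨a, b⟩ hp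
  have hcle := cutsD_mem_le M 0
  rw [hT] at hcle
  have ha : a ≤ M := hcle _ (mem_pairs hp).1
  show ((arr.take M).take a).drop b = PySem.List.slice arr (some (b : Int)) (some (a : Int))
  rw [PySem.List.slice_natCast, List.take_take, min_eq_left ha, List.drop_take]

lemma right_part (arr : List Int) (M : Nat) (hM : M ≤ arr.length) :
    rchunks (arr.drop (arr.length - M)) 0
      = ((((M : Int) :: pvBCuts M (M : Int) 0 2).zip
          ((M : Int) :: pvBCuts M (M : Int) 0 2).tail).map
          (fun p => PySem.List.slice arr
            (some ((arr.length : Int) - (M : Int) + (M : Int) - p.1))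
            (some ((arr.length : Int) - (M : Int) + (M : Int) - p.2)))) := by
  have hlenR : (arr.drop (arr.length - M)).length = M := by rw [List.length_drop]; omega
  rw [rchunks_eq, hlenR]
  rw [show (0 : Int) = ((0 : Nat) : Int) from rfl]
  rw [show (2 : Int) = ((2 ^ (0 + 1) : Nat) : Int) from by norm_num]
  rw [pvBCuts_eq M 0 M 0 (by omega)]
  simp only [Nat.sub_zero]
  obtain ⟨T, hT⟩ : ∃ T, cutsD M 0 = M :: T := ⟨_, by rw [cutsD]⟩
  rw [hT]
  simp only [List.tail_cons]
  rw [show ((M : Int) :: T.map (fun x : Nat => (x : Int))) = (M :: T).map (fun x : Nat => (x : Int)) from by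
    simp]
  conv_rhs => rw [List.zip_map, List.map_map]
  rw [show pairs (M :: T) = (M :: T).zip T from rfl]
  apply List.map_congr_left
  rintro ⟨a, b⟩ hp
  have hcle := cutsD_mem_le M 0
  rw [hT] at hcle
  have ha : a ≤ M := hcle _ (mem_pairs hp).1
  have hb : b ≤ M := hcle _ (mem_pairs hp).2
  show ((arr.drop (arr.length - M)).take (M - b)).drop (M - a)
      = PySem.List.slice arr (some ((arr.length : Int) - (M : Int) + (M : Int) - (a : Int)))
          (some ((arr.length : Int) - (M : Int) + (M : Int) - (b : Int)))
  have e1 : ((arr.length : Int) - (M : Int) + (M : Int) - (a : Int))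
      = ((arr.length - a : Nat) : Int) := by omega
  have e2 : ((arr.length : Int) - (M : Int) + (M : Int) - (b : Int))
      = ((arr.length - b : Nat) : Int) := by omega
  rw [e1, e2, PySem.List.slice_natCast, List.drop_take, List.drop_drop]
  congr 1
  · omega
  · congr 1
    omega

-- ===== VERDICT (by name: the statement is the Claim_ definition above) =====
theorem mirrored_exponential_chunks_spec : Claim_equal_mirrored_exponential_chunks := by
  intro arr _
  unfold Spec_mirrored_exponential_chunks mirrored_exponential_chunks mirrored_exponential_chunks_alt
  dsimp only
  have hMle : arr.length / 2 ≤ arr.length := Nat.div_le_self _ _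
  have hfd : PySem.Int.floordiv (arr.length : Int) 2 = ((arr.length / 2 : Nat) : Int) := by
    exact_mod_cast PySem.Int.floordiv_natCast arr.length 2
  have hmod : PySem.Int.mod (arr.length : Int) 2 = ((arr.length % 2 : Nat) : Int) := by
    exact_mod_cast PySem.Int.mod_natCast arr.length 2
  rw [hfd, Int.toNat_natCast]
  have hlenL : (arr.take (arr.length / 2)).length = arr.length / 2 := by
    rw [List.length_take]; omega
  have hlenR : (arr.drop (arr.length - arr.length / 2)).length = arr.length / 2 := by
    rw [List.length_drop]; omega
  by_cases hp : arr.length % 2 = 1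
  · have hc : PySem.Int.mod (arr.length : Int) 2 ≠ 0 := by rw [hmod, hp]; norm_num
    simp only [if_pos hc]
    conv_lhs => rw [show (((arr.length / 2 : Nat) : Int) + 1) = ((arr.length / 2 + 1 : Nat) : Int)
        from by push_cast; ring]
    conv_lhs => rw [PySem.List.slice_to_natCast, PySem.List.slice_from_natCast]
    conv_lhs => rw [show arr.length / 2 + 1 = arr.length - arr.length / 2 from by omega]
    conv_lhs => rw [show (2 : Int) = ((2 ^ (0 + 1) : Nat) : Int) from by norm_num]
    conv_lhs => rw [pvALoop_eq ((arr.take (arr.length / 2)).length) 0 _ _ [] []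
      (by rw [hlenL, hlenR]) (le_refl _)]
    dsimp only [List.nil_append]
    rw [left_part arr (arr.length / 2) hMle, right_part arr (arr.length / 2) hMle]
  · have hc : ¬ (PySem.Int.mod (arr.length : Int) 2 ≠ 0) := by
      rw [hmod, show arr.length % 2 = 0 from by omega]; norm_num
    simp only [if_neg hc]
    conv_lhs => rw [show ((arr.length : Int) + 1) = ((arr.length + 1 : Nat) : Int)
        from by push_cast; ring]
    have hfd1 : PySem.Int.floordiv ((arr.length + 1 : Nat) : Int) 2
        = (((arr.length + 1) / 2 : Nat) : Int) := by
      exact_mod_cast PySem.Int.floordiv_natCast (arr.length + 1) 2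
    conv_lhs => rw [hfd1,
      show (arr.length + 1) / 2 = arr.length - arr.length / 2 from by omega]
    conv_lhs => rw [PySem.List.slice_to_natCast, PySem.List.slice_from_natCast]
    conv_lhs => rw [show (2 : Int) = ((2 ^ (0 + 1) : Nat) : Int) from by norm_num]
    conv_lhs => rw [pvALoop_eq ((arr.take (arr.length / 2)).length) 0 _ _ [] []
      (by rw [hlenL, hlenR]) (le_refl _)]
    dsimp only [List.nil_append]
    rw [left_part arr (arr.length / 2) hMle, right_part arr (arr.length / 2) hMle]
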